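-- pv_equiv track=rewrite | github.com/tyhan02/Programmers | 프로그래머스/unrated/181886. 5명씩/5명씩.py | solution
-- ===== SOURCE A (Python) =====
-- def solution(names):
--     groups = []
--     num_groups = len(names) // 5
--     remainder = len(names) % 5
--
--     for i in range(num_groups):
--         group = names[i * 5: (i + 1) * 5]
--         groups.append(group[0])
--
--     if remainder > 0:
--         last_group = names[-remainder:]
--         groups.append(last_group[0])
--
--     return groups
-- ===== SOURCE B (Python) =====
-- def solution(names):
--     # Minsu greets the first person of every group of five; names[::5] picks
--     # indices 0, 5, 10, ... -- the head of each full group and of the trailing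
--     # partial group, in one strided slice with no loop or remainder branch.
--     return names[::5]
-- ===== Notes on version B (the rewrite author's own statement) =====
-- stated objective: simpler
-- what changed: Replaced the explicit per-group slicing loop plus separate remainder branch with a single strided slice names[::5].
import Mathlib
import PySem

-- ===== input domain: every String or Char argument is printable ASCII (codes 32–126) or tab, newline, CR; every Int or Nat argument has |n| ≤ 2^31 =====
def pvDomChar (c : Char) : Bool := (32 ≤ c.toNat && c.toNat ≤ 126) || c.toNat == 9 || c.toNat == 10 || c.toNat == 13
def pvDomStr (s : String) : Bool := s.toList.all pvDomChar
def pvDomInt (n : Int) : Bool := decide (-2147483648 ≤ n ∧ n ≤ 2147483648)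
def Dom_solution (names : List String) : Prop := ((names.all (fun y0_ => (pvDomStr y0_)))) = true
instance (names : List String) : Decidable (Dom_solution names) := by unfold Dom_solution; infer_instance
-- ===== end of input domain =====

-- B replaces A's per-group slicing loop + remainder branch with one strided slice names[::5] (simpler).

-- ===== PORT A =====
def solution (names : List String) : List String :=
  let numGroups : Int := PySem.Int.floordiv (names.length : Int) 5
  let remainder : Int := PySem.Int.mod (names.length : Int) 5
  let groups : List String :=
    (PySem.List.pyRange 0 numGroups 1).foldl
      (fun acc i =>
        let group := PySem.List.slice names (some (i * 5)) (some ((i + 1) * 5))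
        -- group[0]: every group in the loop has 5 elements, so the default is never used
        acc ++ [PySem.List.pyGetD group 0 ""]) []
  if remainder > 0 then
    let lastGroup := PySem.List.slice names (some (-remainder)) none
    -- last_group[0]: remainder > 0 means the trailing group is nonempty, default never used
    groups ++ [PySem.List.pyGetD lastGroup 0 ""]
  else groups

-- ===== PORT B =====
def solution_alt (names : List String) : List String :=
  -- names[::5]; the step is the literal 5 ≠ 0, so the slice always yields a value
  (PySem.List.slice? names none none 5).getD []

-- ===== PRECONDITION & SPEC =====
def Spec_solution (names : List String) (out : List String) : Prop := out = solution_alt names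
instance (names : List String) (out : List String) : Decidable (Spec_solution names out) := by unfold Spec_solution; infer_instance

-- ===== CLAIM (what is proved, stated in full; the proofs are below) =====
def Claim_equal_solution : Prop := ∀ (names : List String), Dom_solution names → Spec_solution names (solution names)

-- ===== LEMMAS AND PROOFS =====

-- Common normal form: pick the element at index 5*k for each k below ⌈n/5⌉.
def pvEvery5 (names : List String) : List String :=
  (List.range ((names.length + 4) / 5)).map (fun k => names.getD (5 * k) "")

theorem pvEvery5_eq_alt (names : List String) : solution_alt names = pvEvery5 names := by
  unfold solution_alt pvEvery5
  unfold PySem.List.slice? PySem.List.sliceIndices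
  norm_num
  have hc : (if 0 < names.length then (((names.length : Int) + 5 - 1) / 5).toNat else 0)
      = (names.length + 4) / 5 := by
    by_cases h : 0 < names.length <;> simp [h] <;> omega
  rw [hc]
  rw [List.filterMap_eq_map_iff_forall_eq_some.mpr ?_]
  intro k hk
  rw [List.mem_range] at hk
  have h5k : 5 * k < names.length := by omega
  have hidx : ((5 : Int) * (k : Int)).toNat = 5 * k := by omega
  rw [hidx]
  simp [List.getElem?_eq_getElem h5k]

theorem pvSliceHead (names : List String) (k : Nat) :
    PySem.List.pyGetD
      (PySem.List.slice names (some ((k : Int) * 5)) (some (((k : Int) + 1) * 5))) 0 ""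
      = names.getD (5 * k) "" := by
  have ha : ((k : Int) * 5) = ((5 * k : Nat) : Int) := by push_cast; ring
  have hb : (((k : Int) + 1) * 5) = ((5 * k : Nat) : Int) + ((5 : Nat) : Int) := by
    push_cast; ring
  rw [ha, hb, PySem.List.slice_natCast_add, PySem.List.pyGetD_zero]
  rw [List.getD_eq_getElem?_getD, List.getD_eq_getElem?_getD]
  have h0 : (List.take 5 (List.drop (5 * k) names))[0]? = (List.drop (5 * k) names)[0]? := by
    cases List.drop (5 * k) names <;> simp
  rw [h0]
  simp [List.getElem?_drop]

theorem pvEvery5_eq_a (names : List String) : solution names = pvEvery5 names := by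
  unfold solution pvEvery5
  have h1 : PySem.Int.floordiv ((names.length : Nat) : Int) 5 = ((names.length / 5 : Nat) : Int) := by
    exact_mod_cast PySem.Int.floordiv_natCast names.length 5
  have h2 : PySem.Int.mod ((names.length : Nat) : Int) 5 = ((names.length % 5 : Nat) : Int) := by
    exact_mod_cast PySem.Int.mod_natCast names.length 5
  simp only [h1, h2]
  rw [PySem.List.pyRange_one]
  simp only [sub_zero, Int.toNat_natCast, List.foldl_map, zero_add]
  rw [PySem.List.foldl_append_singleton_eq_map]
  simp only [List.nil_append]
  have hmap : (List.range (names.length / 5)).map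
        (fun y : Nat => PySem.List.pyGetD
          (PySem.List.slice names (some ((y : Int) * 5)) (some (((y : Int) + 1) * 5))) 0 "")
      = (List.range (names.length / 5)).map (fun k => names.getD (5 * k) "") :=
    List.map_congr_left (fun k _ => pvSliceHead names k)
  rw [hmap]
  by_cases hr : 0 < names.length % 5
  · rw [if_pos (by exact_mod_cast hr)]
    have hlast : PySem.List.pyGetD
        (PySem.List.slice names (some (-((names.length % 5 : Nat) : Int))) none) 0 ""
        = names.getD (5 * (names.length / 5)) "" := by
      rw [PySem.List.slice_some_none, PySem.List.clampIdx_neg_natCast _ _ hr]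
      rw [PySem.List.pyGetD_zero, List.getD_eq_getElem?_getD, List.getD_eq_getElem?_getD]
      rw [List.getElem?_drop]
      have h : names.length - names.length % 5 + 0 = 5 * (names.length / 5) := by omega
      rw [h]
    rw [hlast]
    have hcount : (names.length + 4) / 5 = names.length / 5 + 1 := by omega
    rw [hcount, List.range_succ, List.map_append, List.map_singleton]
  · rw [if_neg (by exact_mod_cast hr)]
    have hcount : (names.length + 4) / 5 = names.length / 5 := by omega
    rw [hcount]

-- ===== VERDICT (by name: the statement is the Claim_ definition above) =====
theorem solution_spec : Claim_equal_solution := by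
  intro names _
  unfold Spec_solution
  rw [pvEvery5_eq_a, pvEvery5_eq_alt]
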